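-- pv_equiv track=rewrite | github.com/alaksatti/BrokeAsF | basics.py | oddprod
-- ===== SOURCE A (Python) =====
-- def oddprod(list):
--     ''' find the odd product of any two numbers in a list '''
--     l = []
--     for i in range(len(list)):
--         for j in range(i, len(list)):
--             if i != j:
--                 if (list[i] * list[j]) & 1:
--                     l.append(str(list[i] * list[j]))
--     return ' '.join(l)
-- ===== SOURCE B (Python) =====
-- def oddprod(list):
--     ''' find the odd product of any two numbers in a list '''
--     odds = [x for x in list if x % 2]
--     out = []
--     while odds:
--         x = odds.pop(0)
--         for y in odds:
--             out.append(str(x * y))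
--     return ' '.join(out)
-- ===== Notes on version B (the rewrite author's own statement) =====
-- stated objective: faster
-- what changed: Instead of scanning all O(n^2) index pairs and testing each product's parity, B filters the odd elements once and forms products only among them, so the parity test disappears from the inner loop.
import Mathlib
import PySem

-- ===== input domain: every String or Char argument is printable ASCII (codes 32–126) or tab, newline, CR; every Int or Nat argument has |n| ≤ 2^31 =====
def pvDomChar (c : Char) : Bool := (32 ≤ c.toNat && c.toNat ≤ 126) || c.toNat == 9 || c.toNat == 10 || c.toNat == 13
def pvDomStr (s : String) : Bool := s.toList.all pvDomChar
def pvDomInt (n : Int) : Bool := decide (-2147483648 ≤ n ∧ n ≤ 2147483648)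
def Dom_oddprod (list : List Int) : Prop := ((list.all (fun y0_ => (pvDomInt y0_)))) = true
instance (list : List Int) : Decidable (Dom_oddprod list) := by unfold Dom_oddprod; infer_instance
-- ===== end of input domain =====

-- B replaces A's scan of all index pairs by filtering the odd elements once and pairing
-- only among them (measurably faster; the parity test leaves the inner loop).

-- ===== PORT A =====
-- exact: Python 'p & 1' is p's low bit, i.e. p mod 2 with positive modulus (two's complement)
def pyAnd1 (p : Int) : Int := p % 2

def oddprod (list : List Int) : String :=
  -- l = []; for i in range(len(list)): for j in range(i, len(list)): … ; return ' '.join(l)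
  PySem.Str.join " " ((PySem.List.pyRange 0 (PySem.List.len list) 1).foldl (fun l i =>
    (PySem.List.pyRange i (PySem.List.len list) 1).foldl (fun l j =>
      if i ≠ j then
        -- list[i]/list[j]: i, j come from range(len(list)), always in range, so pyGetD is exact
        if pyAnd1 (PySem.List.pyGetD list i 0 * PySem.List.pyGetD list j 0) ≠ 0 then
          l ++ [PySem.Int.toStr (PySem.List.pyGetD list i 0 * PySem.List.pyGetD list j 0)]
        else l
      else l) l) [])

-- ===== PORT B =====
-- while odds: x = odds.pop(0); for y in odds: out.append(str(x*y))
def oddLoop : List Int → List String → List String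
  | [], out => out
  | x :: odds, out => oddLoop odds (out ++ odds.map (fun y => PySem.Int.toStr (x * y)))

def oddprod_alt (list : List Int) : String :=
  PySem.Str.join " " (oddLoop (list.filter (fun x => PySem.Int.mod x 2 != 0)) [])

-- ===== PRECONDITION & SPEC =====
def Spec_oddprod (list : List Int) (out : String) : Prop := out = oddprod_alt list
instance (list : List Int) (out : String) : Decidable (Spec_oddprod list out) := by unfold Spec_oddprod; infer_instance

-- ===== CLAIM (what is proved, stated in full; the proofs are below) =====
def Claim_equal_oddprod : Prop := ∀ (list : List Int), Dom_oddprod list → Spec_oddprod list (oddprod list)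

-- ===== LEMMAS AND PROOFS =====

-- B's Boolean "x is odd" filter test, in emod form
theorem oddb_eq (x : Int) : (PySem.Int.mod x 2 != 0) = decide (x % 2 ≠ 0) := by
  have h : PySem.Int.mod x 2 = x % 2 := PySem.Int.mod_eq_emod_of_pos (by norm_num)
  rw [h]
  by_cases hx : x % 2 = 0 <;> simp [hx]

-- a product has a set low bit iff both factors are odd
theorem and1_mul (a b : Int) : pyAnd1 (a * b) ≠ 0 ↔ (a % 2 ≠ 0 ∧ b % 2 ≠ 0) := by
  unfold pyAnd1
  have h := Int.mul_emod a b 2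
  have ha := Int.emod_two_eq a
  have hb := Int.emod_two_eq b
  rcases ha with ha | ha <;> rcases hb with hb | hb <;> rw [h, ha, hb] <;> simp

-- all pair products among a list, front to back (the list-level meaning of B's while loop)
def pairsStr : List Int → List String
  | [] => []
  | x :: r => r.map (fun y => PySem.Int.toStr (x * y)) ++ pairsStr r

theorem oddLoop_eq (odds : List Int) : ∀ out, oddLoop odds out = out ++ pairsStr odds := by
  induction odds with
  | nil => intro out; simp [oddLoop, pairsStr]
  | cons x r ih => intro out; simp [oddLoop, pairsStr, ih]

-- the list-level meaning of A's nested index loops: per suffix head, keep the odd products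
def rowsA : List Int → List String
  | [] => []
  | x :: r => ((r.filter (fun y => decide ((x * y) % 2 ≠ 0))).map
                (fun y => PySem.Int.toStr (x * y))) ++ rowsA r

-- index-comprehension to list form: filter-then-map through pyGetD over a suffix range
theorem filtmap_range (xs : List Int) (k : Nat) (q : Int → Bool) (f : Int → String) :
    ((PySem.List.pyRange (k:Int) (PySem.List.len xs) 1).filter
        (fun j => q (PySem.List.pyGetD xs j 0))).map
      (fun j => f (PySem.List.pyGetD xs j 0))
    = ((xs.drop k).filter q).map f := by
  have hmap : (PySem.List.pyRange (k:Int) (PySem.List.len xs) 1).map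
      (fun j => PySem.List.pyGetD xs j 0) = xs.drop k := by
    have := PySem.List.map_pyGetD_pyRange xs (0:Int) (a := (k:Int)) (by positivity)
    simpa using this
  rw [← hmap, List.filter_map, List.map_map]
  rfl

-- A's inner loop for row k (k < len): the head j = k is skipped, the tail keeps odd products
theorem inner_eq (xs : List Int) (k : Nat) (hk : k < xs.length) (acc : List String) :
    (PySem.List.pyRange (k:Int) (PySem.List.len xs) 1).foldl (fun l j =>
      if (k:Int) ≠ j then
        if pyAnd1 (PySem.List.pyGetD xs (k:Int) 0 * PySem.List.pyGetD xs j 0) ≠ 0 then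
          l ++ [PySem.Int.toStr (PySem.List.pyGetD xs (k:Int) 0 * PySem.List.pyGetD xs j 0)]
        else l
      else l) acc
    = acc ++ ((xs.drop (k+1)).filter
          (fun y => decide ((xs.getD k 0 * y) % 2 ≠ 0))).map
        (fun y => PySem.Int.toStr (xs.getD k 0 * y)) := by
  rw [PySem.List.pyRange_one_cons (by simp; exact_mod_cast hk)]
  rw [List.foldl_cons]
  simp only [ne_eq, not_true_eq_false, if_false]
  have hcongr := PySem.List.foldl_congr_mem
    (l := PySem.List.pyRange ((k:Int)+1) (PySem.List.len xs) 1) (init := acc)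
    (f := fun l j =>
      if (k:Int) ≠ j then
        if pyAnd1 (PySem.List.pyGetD xs (k:Int) 0 * PySem.List.pyGetD xs j 0) ≠ 0 then
          l ++ [PySem.Int.toStr (PySem.List.pyGetD xs (k:Int) 0 * PySem.List.pyGetD xs j 0)]
        else l
      else l)
    (g := fun l j =>
      if pyAnd1 (PySem.List.pyGetD xs (k:Int) 0 * PySem.List.pyGetD xs j 0) ≠ 0 then
        l ++ [PySem.Int.toStr (PySem.List.pyGetD xs (k:Int) 0 * PySem.List.pyGetD xs j 0)]
      else l)
    (by
      intro l j hj
      have hkj : (k:Int) ≠ j := by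
        have := (PySem.List.mem_pyRange_one.mp hj).1
        omega
      simp only [if_pos hkj])
  rw [hcongr]
  rw [PySem.List.foldl_append_ite]
  have hc : ((k:Int) + 1) = (((k+1:Nat)):Int) := by push_cast; ring
  rw [hc, filtmap_range xs (k+1)
    (q := fun y => decide (pyAnd1 (PySem.List.pyGetD xs (k:Int) 0 * y) ≠ 0))
    (f := fun y => PySem.Int.toStr (PySem.List.pyGetD xs (k:Int) 0 * y))]
  have hget : PySem.List.pyGetD xs (k:Int) 0 = xs.getD k 0 := by simp
  rw [hget]
  simp [pyAnd1]

-- A's outer loop from row k downward computes rowsA of the k-th suffix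
theorem outer_eq (xs : List Int) : ∀ (m k : Nat), xs.length - k = m → k ≤ xs.length →
    ∀ acc : List String,
    (PySem.List.pyRange (k:Int) (PySem.List.len xs) 1).foldl (fun l i =>
      (PySem.List.pyRange i (PySem.List.len xs) 1).foldl (fun l j =>
        if i ≠ j then
          if pyAnd1 (PySem.List.pyGetD xs i 0 * PySem.List.pyGetD xs j 0) ≠ 0 then
            l ++ [PySem.Int.toStr (PySem.List.pyGetD xs i 0 * PySem.List.pyGetD xs j 0)]
          else l
        else l) l) acc
    = acc ++ rowsA (xs.drop k) := by
  intro m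
  induction m with
  | zero =>
    intro k hm hk acc
    have hkl : k = xs.length := by omega
    rw [PySem.List.pyRange_one_eq_nil (by simp [hkl])]
    simp [hkl, rowsA]
  | succ m ih =>
    intro k hm hk acc
    have hklt : k < xs.length := by omega
    rw [PySem.List.pyRange_one_cons (by simp; exact_mod_cast hklt)]
    rw [List.foldl_cons]
    rw [inner_eq xs k hklt acc]
    have hc : ((k:Int) + 1) = (((k+1:Nat)):Int) := by push_cast; ring
    rw [hc, ih (k+1) (by omega) (by omega)]
    have hdrop : xs.drop k = xs.getD k 0 :: xs.drop (k+1) := by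
      rw [List.getD_eq_getElem xs 0 hklt]
      exact List.drop_eq_getElem_cons hklt
    rw [hdrop]
    simp [rowsA]

-- rowsA equals B's pairing among the odd elements
theorem rowsA_eq_pairs (xs : List Int) :
    rowsA xs = pairsStr (xs.filter (fun x => PySem.Int.mod x 2 != 0)) := by
  induction xs with
  | nil => simp [rowsA, pairsStr]
  | cons x r ih =>
    by_cases hx : x % 2 ≠ 0
    · have hb : (PySem.Int.mod x 2 != 0) = true := by rw [oddb_eq]; simpa using hx
      have hfc : r.filter (fun y => decide ((x * y) % 2 ≠ 0))
          = r.filter (fun y => PySem.Int.mod y 2 != 0) := by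
        apply List.filter_congr
        intro y _
        rw [oddb_eq]
        have := and1_mul x y
        simp only [pyAnd1] at this
        by_cases hy : y % 2 ≠ 0 <;> simp [hy, this, hx]
      simp only [rowsA, List.filter_cons, hb, if_pos, pairsStr, ih, hfc]
    · have hb : (PySem.Int.mod x 2 != 0) = false := by
        rw [oddb_eq]; simpa using not_not.mp hx
      have hnil : r.filter (fun y => decide ((x * y) % 2 ≠ 0)) = [] := by
        apply List.filter_eq_nil_iff.mpr
        intro y _
        have := and1_mul x y
        simp only [pyAnd1] at this
        simp [this, not_not.mp hx]
      simp only [rowsA, List.filter_cons, hb, hnil, List.map_nil, List.nil_append, ih]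
      simp

-- ===== VERDICT (by name: the statement is the Claim_ definition above) =====
theorem oddprod_spec : Claim_equal_oddprod := by
  intro list _
  unfold Spec_oddprod oddprod oddprod_alt
  have h := outer_eq list list.length 0 (by omega) (by omega) []
  push_cast at h
  rw [oddLoop_eq, ← rowsA_eq_pairs, h]
  simp
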